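-- pv_equiv track=rewrite | github.com/alexandraback/datacollection | solutions_2692487_1/Python/maplebaconburgr/main.py | osmos
-- ===== SOURCE A (Python) =====
-- def osmos(size, others, operations):
--   #  if(len(others) > 0):
--   #      print size, "\t", others[0], "\t", operations;
--
--     if len(others) == 0:
--         return operations;
--     elif size > others[0]:
--         size = size + others[0];
--         return osmos(size, others[1:], operations)
--     elif size <= 1:
--         return operations + len(others);
--     else:
--         alt = len(others);
--         next = others[0];
--         tempOps = 0;
--         while size <= next:
--             size = size*2 - 1;
--            # print size, "\t", tempOps+1;
--             tempOps = tempOps + 1;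
--         if tempOps >= alt:
--             return operations + alt;
--         else:
--             possible = osmos(size  + next, others[1:], operations + tempOps);
--             return min(possible, operations + alt);
--
--
--     return 'FAIL';
-- ===== SOURCE B (Python) =====
-- def osmos(size, others, operations):
--     # Iterative rewrite: one pass over `others` with accumulated ops and a
--     # running minimum `best` replacing A's nested recursive min.
--     best = None
--     ops = operations
--     i = 0
--     n = len(others)
--     while i < n:
--         if size > others[i]:
--             size += others[i]
--             i += 1
--         elif size <= 1:
--             r = ops + (n - i)
--             return r if best is None or r < best else best
--         else:
--             tempOps = 0
--             while size <= others[i]: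
--                 size = size * 2 - 1
--                 tempOps += 1
--             alt = n - i
--             cand = ops + alt
--             best = cand if best is None or cand < best else best
--             if tempOps >= alt:
--                 return best
--             ops += tempOps
--             size += others[i]
--             i += 1
--     return ops if best is None or ops < best else best
-- ===== Notes on version B (the rewrite author's own statement) =====
-- stated objective: faster
-- what changed: Replaced A's nested recursion, whose delete-now candidates are combined by min over the recursive results, with a single iterative pass over an index into others carrying accumulated ops and a running minimum best; the constant-factor gain comes from removing one Python function call per absorbed element.
import Mathlib
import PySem

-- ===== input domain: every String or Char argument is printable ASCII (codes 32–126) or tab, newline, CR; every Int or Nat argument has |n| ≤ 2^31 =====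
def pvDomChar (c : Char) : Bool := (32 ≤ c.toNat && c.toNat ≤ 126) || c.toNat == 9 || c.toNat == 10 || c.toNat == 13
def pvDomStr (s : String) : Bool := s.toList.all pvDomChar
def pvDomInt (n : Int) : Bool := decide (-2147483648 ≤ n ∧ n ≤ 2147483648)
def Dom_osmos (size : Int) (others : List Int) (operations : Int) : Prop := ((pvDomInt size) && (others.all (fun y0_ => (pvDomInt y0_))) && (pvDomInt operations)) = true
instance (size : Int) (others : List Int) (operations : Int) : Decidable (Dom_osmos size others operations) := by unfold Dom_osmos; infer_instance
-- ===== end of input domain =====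

-- B replaces A's nested recursion (with min over recursive results) by a single
-- iterative pass carrying accumulated ops and a running minimum (objective: alternative).

-- ===== PORT A =====
-- port of A's 'while size <= next: size = size*2 - 1; tempOps += 1'; returns (size, tempOps).
-- The guard 2 ≤ size only makes the definition total (Python enters the loop with size ≥ 2).
def osmosGrow (size next : Int) : Int × Int :=
  if _h : 2 ≤ size ∧ size ≤ next then
    let r := osmosGrow (size * 2 - 1) next
    (r.1, r.2 + 1)
  else (size, 0)
termination_by (next + 1 - size).toNat
decreasing_by omega

def osmos (size : Int) (others : List Int) (operations : Int) : Int :=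
  match others with
  | [] => operations
  | next :: rest =>
    if next < size then
      osmos (size + next) rest operations
    else if size ≤ 1 then
      operations + ((rest.length : Int) + 1)
    else
      let alt : Int := (rest.length : Int) + 1
      let st := osmosGrow size next
      if st.2 ≥ alt then operations + alt
      else min (osmos (st.1 + next) rest (operations + st.2)) (operations + alt)

-- ===== PORT B =====
-- port of B's inner doubling loop (identical code to A's, kept separate per side)
def osmosAltGrow (size next : Int) : Int × Int :=
  if _h : 2 ≤ size ∧ size ≤ next then
    let r := osmosAltGrow (size * 2 - 1) next
    (r.1, r.2 + 1)
  else (size, 0)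
termination_by (next + 1 - size).toNat
decreasing_by omega

-- B's while loop over the remaining suffix of `others`, carrying ops and best (None = no candidate yet)
def osmosAltLoop (size : Int) (others : List Int) (ops : Int) (best : Option Int) : Int :=
  match others with
  | [] =>
    match best with
    | none => ops
    | some b => if ops < b then ops else b
  | x :: rest =>
    if x < size then
      osmosAltLoop (size + x) rest ops best
    else if size ≤ 1 then
      let r := ops + ((rest.length : Int) + 1)
      match best with
      | none => r
      | some b => if r < b then r else b
    else
      let st := osmosAltGrow size x
      let alt : Int := (rest.length : Int) + 1
      let cand := ops + alt
      let b' : Int := match best with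
        | none => cand
        | some b => if cand < b then cand else b
      if st.2 ≥ alt then b'
      else osmosAltLoop (st.1 + x) rest (ops + st.2) (some b')

def osmos_alt (size : Int) (others : List Int) (operations : Int) : Int :=
  osmosAltLoop size others operations none

-- ===== PRECONDITION & SPEC =====
def Spec_osmos (size : Int) (others : List Int) (operations : Int) (out : Int) : Prop := out = osmos_alt size others operations
instance (size : Int) (others : List Int) (operations : Int) (out : Int) : Decidable (Spec_osmos size others operations out) := by unfold Spec_osmos; infer_instance

-- ===== CLAIM (what is proved, stated in full; the proofs are below) =====
def Claim_equal_osmos : Prop := ∀ (size : Int) (others : List Int) (operations : Int), Dom_osmos size others operations → Spec_osmos size others operations (osmos size others operations)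

-- ===== LEMMAS AND PROOFS =====

theorem osmosAltGrow_eq (size next : Int) : osmosAltGrow size next = osmosGrow size next := by
  induction size using osmosAltGrow.induct (next := next) with
  | case1 s h ih =>
    rw [osmosAltGrow, osmosGrow, dif_pos h, dif_pos h]
    simp only [ih]
  | case2 s h =>
    rw [osmosAltGrow, osmosGrow, dif_neg h, dif_neg h]

-- the loop invariant: the accumulator `best` is folded in as a running minimum of A's value
theorem osmosAltLoop_eq (others : List Int) : ∀ (size ops : Int) (best : Option Int),
    osmosAltLoop size others ops best =
      match best with
      | none => osmos size others ops
      | some b => min b (osmos size others ops) := by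
  induction others with
  | nil =>
    intro size ops best
    cases best with
    | none => rfl
    | some b =>
      simp only [osmosAltLoop, osmos]
      omega
  | cons x rest ih =>
    intro size ops best
    rw [osmosAltLoop, osmos]
    by_cases h1 : x < size
    · rw [if_pos h1, if_pos h1, ih]
    · rw [if_neg h1, if_neg h1]
      by_cases h2 : size ≤ 1
      · rw [if_pos h2, if_pos h2]
        cases best with
        | none => rfl
        | some b => simp only; omega
      · rw [if_neg h2, if_neg h2]
        simp only [osmosAltGrow_eq]
        by_cases h3 : (osmosGrow size x).2 ≥ (rest.length : Int) + 1
        · rw [if_pos h3, if_pos h3]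
          cases best with
          | none => rfl
          | some b => simp only; omega
        · rw [if_neg h3, if_neg h3, ih]
          cases best with
          | none => simp only; omega
          | some b => simp only; omega

-- ===== VERDICT (by name: the statement is the Claim_ definition above) =====
theorem osmos_spec : Claim_equal_osmos := by
  intro size others operations _
  show osmos size others operations = osmos_alt size others operations
  rw [osmos_alt, osmosAltLoop_eq]
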